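-- pv_equiv track=rewrite | github.com/IPconfig/testdriven-app | services/plc/project/api/utils.py | filter_tube_state
-- ===== SOURCE A (Python) =====
-- def filter_tube_state(tubes_per_row, tubes_row_values):
--     '''
--     returns a list with a list of values per row
--     Since the array is 10k elements originally,
--     this will only list neccesary elements.
--     This list will be passed to the client
--     '''
--     result = []
--     start = 0
--     for tubes in tubes_per_row:
--         _temp = [tubes_row_values[start:start + tubes]]
--         start = start + tubes
--         result.extend(_temp)
--     return result
-- ===== SOURCE B (Python) =====
-- def filter_tube_state(tubes_per_row, tubes_row_values):
--     # Precompute the table of cumulative cut points, then slice each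
--     # consecutive pair of offsets (same slice expression as the original).
--     offsets = [0]
--     for tubes in tubes_per_row:
--         offsets.append(offsets[-1] + tubes)
--     return [tubes_row_values[s:e] for s, e in zip(offsets, offsets[1:])]
-- ===== Notes on version B (the rewrite author's own statement) =====
-- stated objective: alternative
-- what changed: B precomputes the full table of cumulative cut offsets first, then builds the rows as a comprehension slicing each consecutive offset pair, instead of A's single loop that slices while carrying a running start accumulator and extends the result.
import Mathlib
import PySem

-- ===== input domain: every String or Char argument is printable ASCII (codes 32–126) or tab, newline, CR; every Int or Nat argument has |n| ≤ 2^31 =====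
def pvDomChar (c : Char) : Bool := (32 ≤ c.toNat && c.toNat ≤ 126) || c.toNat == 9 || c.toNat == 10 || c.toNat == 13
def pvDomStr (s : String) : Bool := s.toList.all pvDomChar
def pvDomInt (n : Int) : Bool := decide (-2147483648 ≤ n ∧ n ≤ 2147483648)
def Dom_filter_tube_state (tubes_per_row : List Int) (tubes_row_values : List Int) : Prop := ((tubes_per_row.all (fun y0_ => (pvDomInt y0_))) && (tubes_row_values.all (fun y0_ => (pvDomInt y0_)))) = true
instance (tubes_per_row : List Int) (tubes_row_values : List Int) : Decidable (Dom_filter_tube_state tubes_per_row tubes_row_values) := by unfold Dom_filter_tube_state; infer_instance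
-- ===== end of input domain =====

-- B builds the table of cumulative cut offsets up front and slices consecutive
-- offset pairs, replacing A's running-start accumulator loop (objective: alternative).


-- ===== PORT A =====
-- loop state: (result, start); each step appends [values[start:start+tubes]]
def filter_tube_state (tubes_per_row : List Int) (tubes_row_values : List Int) : List (List Int) :=
  (tubes_per_row.foldl
    (fun (st : List (List Int) × Int) tubes =>
      (st.1 ++ [PySem.List.slice tubes_row_values (some st.2) (some (st.2 + tubes))],
       st.2 + tubes))
    ([], 0)).1

-- ===== PORT B =====
-- offsets = cumulative cut points (appending offsets[-1] + tubes), then slice each pair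
def filter_tube_state_alt (tubes_per_row : List Int) (tubes_row_values : List Int) : List (List Int) :=
  let offsets : List Int :=
    tubes_per_row.foldl (fun acc tubes => acc ++ [acc.getLast! + tubes]) [0]
  (offsets.zip offsets.tail).map
    (fun p => PySem.List.slice tubes_row_values (some p.1) (some p.2))

-- ===== PRECONDITION & SPEC =====
def Spec_filter_tube_state (tubes_per_row : List Int) (tubes_row_values : List Int) (out : List (List Int)) : Prop := out = filter_tube_state_alt tubes_per_row tubes_row_values
instance (tubes_per_row : List Int) (tubes_row_values : List Int) (out : List (List Int)) : Decidable (Spec_filter_tube_state tubes_per_row tubes_row_values out) := by unfold Spec_filter_tube_state; infer_instance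

-- ===== CLAIM (what is proved, stated in full; the proofs are below) =====
def Claim_equal_filter_tube_state : Prop := ∀ (tubes_per_row : List Int) (tubes_row_values : List Int), Dom_filter_tube_state tubes_per_row tubes_row_values → Spec_filter_tube_state tubes_per_row tubes_row_values (filter_tube_state tubes_per_row tubes_row_values)

-- ===== LEMMAS AND PROOFS =====

-- common reference shape: the list of slices, carrying the running start
def pvRows (trv : List Int) (start : Int) : List Int → List (List Int)
  | [] => []
  | t :: ts => PySem.List.slice trv (some start) (some (start + t)) :: pvRows trv (start + t) ts

theorem pvA_eq_rows (trv : List Int) (ts : List Int) :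
    ∀ (res : List (List Int)) (start : Int),
    (ts.foldl
      (fun (st : List (List Int) × Int) tubes =>
        (st.1 ++ [PySem.List.slice trv (some st.2) (some (st.2 + tubes))], st.2 + tubes))
      (res, start)).1 = res ++ pvRows trv start ts := by
  induction ts with
  | nil => intro res start; simp [pvRows]
  | cons t ts ih =>
      intro res start
      simp only [List.foldl_cons, pvRows]
      rw [ih]
      simp

theorem pvGetLast_concat (l : List Int) (s : Int) : (l ++ [s]).getLast! = s := by
  induction l with
  | nil => rfl
  | cons a l ih => simp [List.getLast!]

-- consecutive pairs of (l ++ [s] ++ [x]) are those of (l ++ [s]) plus (s, x)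
theorem pvZipTail_concat (l : List Int) (s x : Int) :
    ((l ++ [s] ++ [x]).zip (l ++ [s] ++ [x]).tail) =
      ((l ++ [s]).zip (l ++ [s]).tail) ++ [(s, x)] := by
  induction l with
  | nil => simp
  | cons a l ih =>
      cases l with
      | nil => simp
      | cons b l =>
          simpa using ih

theorem pvB_eq_rows (trv : List Int) (ts : List Int) :
    ∀ (l : List Int) (s : Int),
    (let offsets := ts.foldl (fun acc tubes => acc ++ [acc.getLast! + tubes]) (l ++ [s])
     (offsets.zip offsets.tail).map
       (fun p => PySem.List.slice trv (some p.1) (some p.2))) =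
    ((l ++ [s]).zip (l ++ [s]).tail).map
       (fun p => PySem.List.slice trv (some p.1) (some p.2)) ++ pvRows trv s ts := by
  induction ts with
  | nil => intro l s; simp [pvRows]
  | cons t ts ih =>
      intro l s
      simp only [List.foldl_cons]
      rw [pvGetLast_concat]
      have h := ih (l ++ [s]) (s + t)
      rw [h, pvZipTail_concat]
      simp [pvRows]

-- ===== VERDICT (by name: the statement is the Claim_ definition above) =====
theorem filter_tube_state_spec : Claim_equal_filter_tube_state := by
  intro tpr trv _
  unfold Spec_filter_tube_state filter_tube_state filter_tube_state_alt
  rw [pvA_eq_rows]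
  have h := pvB_eq_rows trv tpr [] 0
  simp only [List.nil_append] at h
  rw [h]
  simp
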